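-- pv_equiv track=rewrite | github.com/re-models/theodias | theodias/util.py | __dec2ternary
-- ===== SOURCE A (Python) =====
-- def __dec2ternary(pos, n_sentences):
--     if pos == 0:
--         return [0 for i in range(n_sentences)]
--     digits = []
--     while pos:
--         digits.append(int(pos % 3))
--         pos //= 3
--     return [0 for i in range(n_sentences - len(digits))] + digits[::-1]
-- ===== SOURCE B (Python) =====
-- def __dec2ternary(pos, n_sentences):
--     w = 0
--     while 3 ** w <= pos:
--         w += 1
--     n = max(n_sentences, w)
--     return [0] * (n - w) + [pos // 3 ** i % 3 for i in range(w - 1, -1, -1)]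
-- ===== Notes on version B (the rewrite author's own statement) =====
-- stated objective: alternative
-- what changed: Instead of a divmod loop collecting little-endian digits then reversing and padding by list concatenation, B computes the digit count up front, pads with [0]*(n-w) and extracts the w real digits directly most-significant-first with pos // 3**i % 3; Pre_ excludes negative pos, on which A's while loop never terminates.
import Mathlib
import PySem

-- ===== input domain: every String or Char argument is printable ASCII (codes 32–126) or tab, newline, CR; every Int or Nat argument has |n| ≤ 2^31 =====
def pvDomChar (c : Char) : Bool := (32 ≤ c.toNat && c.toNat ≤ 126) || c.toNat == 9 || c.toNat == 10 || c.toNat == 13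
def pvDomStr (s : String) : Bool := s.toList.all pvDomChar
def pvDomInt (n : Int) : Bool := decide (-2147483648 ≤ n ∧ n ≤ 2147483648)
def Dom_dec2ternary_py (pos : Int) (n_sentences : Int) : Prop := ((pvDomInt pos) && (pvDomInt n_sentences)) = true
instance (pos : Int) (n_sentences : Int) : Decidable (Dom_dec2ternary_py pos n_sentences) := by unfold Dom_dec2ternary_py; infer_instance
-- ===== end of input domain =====

-- B replaces A's divmod-collect / reverse / pad pipeline by direct most-significant-first
-- positional digit extraction; the equivalence is claimed for pos ≥ 0 (A's loop never terminates otherwise).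

-- ===== PORT A =====
-- the 'while pos:' loop; fuel = pos.toNat + 1 iterations always suffice on the admitted inputs
def pvAloop : Nat → Int → List Int → List Int
  | 0, _, digits => digits
  | fuel+1, pos, digits =>
    if pos = 0 then digits
    else pvAloop fuel (PySem.Int.floordiv pos 3) (digits ++ [PySem.Int.mod pos 3])

def dec2ternary_py (pos : Int) (n_sentences : Int) : List Int :=
  if pos = 0 then List.replicate n_sentences.toNat 0
  else
    let digits := pvAloop (pos.toNat + 1) pos []
    List.replicate (n_sentences - (digits.length : Int)).toNat 0 ++ digits.reverse

-- ===== PORT B =====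
-- the 'while 3 ** w <= pos:' loop; fuel = pos.toNat + 1 iterations always suffice
def pvBwidth : Nat → Int → Nat → Nat
  | 0, _, w => w
  | fuel+1, pos, w => if (3:Int) ^ w ≤ pos then pvBwidth fuel pos (w+1) else w

def dec2ternary_py_alt (pos : Int) (n_sentences : Int) : List Int :=
  let w0 : Nat := pvBwidth (pos.toNat + 1) pos 0
  let n : Int := max n_sentences (w0 : Int)
  -- every i in the range is ≥ 0, so 3 ^ i.toNat is exactly Python's 3 ** i
  List.replicate (n - (w0 : Int)).toNat 0 ++
    (PySem.List.pyRange ((w0 : Int) - 1) (-1) (-1)).map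
      (fun i => PySem.Int.mod (PySem.Int.floordiv pos ((3:Int) ^ i.toNat)) 3)

-- ===== PRECONDITION & SPEC =====
-- Pre_ excludes negative pos: there A's 'while pos:' loop never terminates
-- (pos % 3 ∈ {0,1,2} and pos //= 3 stays negative), so A returns on exactly 0 ≤ pos.
def Pre_dec2ternary_py (pos : Int) (n_sentences : Int) : Prop := 0 ≤ pos
instance (pos : Int) (n_sentences : Int) : Decidable (Pre_dec2ternary_py pos n_sentences) := by
  unfold Pre_dec2ternary_py; infer_instance

def pvWitness_dec2ternary_py : Int × Int := (5, 3)

def Spec_dec2ternary_py (pos : Int) (n_sentences : Int) (out : List Int) : Prop :=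
  out = dec2ternary_py_alt pos n_sentences
instance (pos : Int) (n_sentences : Int) (out : List Int) : Decidable (Spec_dec2ternary_py pos n_sentences out) := by
  unfold Spec_dec2ternary_py; infer_instance

-- ===== CLAIM =====
def Claim_equal_dec2ternary_py : Prop :=
  ∀ (pos : Int) (n_sentences : Int), Dom_dec2ternary_py pos n_sentences →
    Pre_dec2ternary_py pos n_sentences →
    Spec_dec2ternary_py pos n_sentences (dec2ternary_py pos n_sentences)

-- ===== LEMMAS AND PROOFS =====

-- little-endian ternary digits of a natural number (the mathematical object both loops build)
def pvLE : Nat → List Int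
  | 0 => []
  | n+1 => (((n+1) % 3 : Nat) : Int) :: pvLE ((n+1) / 3)
decreasing_by exact Nat.div_lt_self (Nat.succ_pos n) (by norm_num)

theorem pvLE_zero : pvLE 0 = [] := by simp [pvLE]

theorem pvLE_pos {n : Nat} (h : 0 < n) :
    pvLE n = ((n % 3 : Nat) : Int) :: pvLE (n / 3) := by
  obtain ⟨m, rfl⟩ := Nat.exists_eq_succ_of_ne_zero h.ne'
  simp [pvLE]

-- bounds characterising the digit count t = (pvLE n).length
theorem pvLE_len_upper (n : Nat) : n < 3 ^ (pvLE n).length := by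
  induction n using Nat.strong_induction_on with
  | _ n ih =>
    rcases Nat.eq_zero_or_pos n with rfl | hn
    · simp [pvLE_zero]
    · rw [pvLE_pos hn]
      have h3 : n / 3 < n := Nat.div_lt_self hn (by norm_num)
      have := ih (n / 3) h3
      have hmod : n % 3 < 3 := Nat.mod_lt _ (by norm_num)
      have hdm : n = 3 * (n / 3) + n % 3 := (Nat.div_add_mod n 3).symm ▸ by omega
      simp only [List.length_cons, pow_succ]
      omega

theorem pvLE_len_lower (n : Nat) (h : 0 < (pvLE n).length) :
    3 ^ ((pvLE n).length - 1) ≤ n := by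
  induction n using Nat.strong_induction_on with
  | _ n ih =>
    rcases Nat.eq_zero_or_pos n with rfl | hn
    · simp [pvLE_zero] at h
    · rw [pvLE_pos hn] at h ⊢
      simp only [List.length_cons, Nat.add_sub_cancel]
      rcases Nat.eq_zero_or_pos (pvLE (n / 3)).length with h0 | hpos
      · rw [h0]; simpa using hn
      · have h3 : n / 3 < n := Nat.div_lt_self hn (by norm_num)
        have := ih (n / 3) h3 hpos
        have hdm : n = 3 * (n / 3) + n % 3 := (Nat.div_add_mod n 3).symm ▸ by omega
        calc 3 ^ (pvLE (n / 3)).length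
            = 3 ^ ((pvLE (n / 3)).length - 1 + 1) := by congr 1; omega
          _ = 3 * 3 ^ ((pvLE (n / 3)).length - 1) := by rw [pow_succ]; ring
          _ ≤ 3 * (n / 3) := by omega
          _ ≤ n := by omega

theorem pvLE_mono_pow {n w : Nat} (h : w < (pvLE n).length) : 3 ^ w ≤ n := by
  have h1 := pvLE_len_lower n (by omega)
  calc 3 ^ w ≤ 3 ^ ((pvLE n).length - 1) := Nat.pow_le_pow_right (by norm_num) (by omega)
    _ ≤ n := h1

-- A's loop produces exactly the little-endian digits
theorem pvAloop_eq (fuel : Nat) : ∀ (n : Nat) (acc : List Int), n ≤ fuel →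
    pvAloop fuel (n : Int) acc = acc ++ pvLE n := by
  induction fuel with
  | zero => intro n acc h; interval_cases n; simp [pvAloop, pvLE_zero]
  | succ fuel ih =>
    intro n acc h
    rcases Nat.eq_zero_or_pos n with rfl | hn
    · simp [pvAloop, pvLE_zero]
    · have hne : (n : Int) ≠ 0 := by exact_mod_cast hn.ne'
      have hf : PySem.Int.floordiv (n : Int) 3 = ((n / 3 : Nat) : Int) := by
        exact_mod_cast PySem.Int.floordiv_natCast n 3
      have hm : PySem.Int.mod (n : Int) 3 = ((n % 3 : Nat) : Int) := by
        exact_mod_cast PySem.Int.mod_natCast n 3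
      rw [pvAloop, if_neg hne, hf, hm,
        ih (n / 3) _ (by omega), pvLE_pos hn]
      simp

-- B's loop computes the digit count
theorem pvBwidth_eq (fuel : Nat) : ∀ (n w : Nat), w ≤ (pvLE n).length →
    n < 3 ^ (w + fuel) → pvBwidth fuel (n : Int) w = (pvLE n).length := by
  induction fuel with
  | zero =>
    intro n w hw hlt
    have hlt' : n < 3 ^ w := by simpa using hlt
    have : ¬ w < (pvLE n).length := fun hc => absurd (pvLE_mono_pow hc) (by omega)
    simp only [pvBwidth]; omega
  | succ fuel ih =>
    intro n w hw hlt
    rw [pvBwidth]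
    have hcast : ((3:Int) ^ w ≤ (n : Int)) ↔ 3 ^ w ≤ n := by
      constructor <;> intro h <;> exact_mod_cast h
    by_cases h : (3:Int) ^ w ≤ (n : Int)
    · rw [if_pos h]
      have h' : 3 ^ w ≤ n := hcast.mp h
      have hwlt : w < (pvLE n).length := by
        rcases lt_or_eq_of_le hw with h1 | rfl
        · exact h1
        · exact absurd (pvLE_len_upper n) (by omega)
      exact ih n (w+1) hwlt (by rw [show w+1+fuel = w+(fuel+1) by omega]; exact hlt)
    · rw [if_neg h]
      have h' : ¬ 3 ^ w ≤ n := fun hh => h (hcast.mpr hh)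
      have : ¬ w < (pvLE n).length := fun hlt' => h' (pvLE_mono_pow hlt')
      omega

-- the core identity: the positional big-endian sweep equals digits padded with zeros
theorem pv_core (n : Nat) : ∀ w, (pvLE n).length ≤ w →
    (List.range w).map (fun k => ((n / 3 ^ k % 3 : Nat) : Int))
      = pvLE n ++ List.replicate (w - (pvLE n).length) 0 := by
  induction n using Nat.strong_induction_on with
  | _ n ih =>
    intro w hw
    rcases Nat.eq_zero_or_pos n with rfl | hn
    · simp [pvLE_zero, List.map_const']
    · rw [pvLE_pos hn] at hw ⊢
      simp only [List.length_cons] at hw ⊢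
      obtain ⟨w', rfl⟩ : ∃ w', w = w' + 1 := ⟨w - 1, by omega⟩
      rw [List.range_succ_eq_map, List.map_cons, List.map_map]
      have h3 : n / 3 < n := Nat.div_lt_self hn (by norm_num)
      have ihs := ih (n / 3) h3 w' (by omega)
      have hfun : ((fun k => ((n / 3 ^ k % 3 : Nat) : Int)) ∘ Nat.succ)
          = (fun k => ((n / 3 / 3 ^ k % 3 : Nat) : Int)) := by
        funext k
        simp [Function.comp, pow_succ, Nat.div_div_eq_div_mul, Nat.mul_comm]
      rw [hfun, ihs]
      have hlen : w' + 1 - ((pvLE (n / 3)).length + 1) = w' - (pvLE (n / 3)).length := by omega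
      simp [pow_zero, Nat.div_one, hlen]

-- ===== VERDICT =====
theorem dec2ternary_py_spec : Claim_equal_dec2ternary_py := by
  intro pos ns _ hpre
  have hp : (0:Int) ≤ pos := hpre
  unfold Spec_dec2ternary_py
  obtain ⟨n, rfl⟩ : ∃ m : Nat, pos = (m : Int) := ⟨pos.toNat, by omega⟩
  set t := (pvLE n).length with ht
  -- B's width loop returns the digit count
  have hwidth : pvBwidth (((n:Int)).toNat + 1) (n:Int) 0 = t := by
    rw [Int.toNat_natCast]
    exact pvBwidth_eq (n+1) n 0 (Nat.zero_le _)
      (lt_of_lt_of_le (Nat.lt_pow_self (by norm_num))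
        (Nat.pow_le_pow_right (by norm_num) (by omega)))
  -- B's output is zero padding followed by the reversed digits
  have hB : dec2ternary_py_alt (n:Int) ns
      = List.replicate ((max ns (t:Int)) - (t:Int)).toNat 0 ++ (pvLE n).reverse := by
    simp only [dec2ternary_py_alt, hwidth]
    have hrange : PySem.List.pyRange ((t:Int) - 1) (-1) (-1)
        = (PySem.List.pyRange 0 (t:Int) 1).reverse := by
      simpa using PySem.List.pyRange_neg_one_eq_reverse ((t:Int) - 1) (-1)
    rw [hrange, List.map_reverse, PySem.List.pyRange_one, List.map_map]
    have hfun : ((fun i : Int => PySem.Int.mod (PySem.Int.floordiv ((n:Int)) ((3:Int) ^ i.toNat)) 3)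
        ∘ (fun k : Nat => (0:Int) + (k:Int)))
        = fun k : Nat => ((n / 3 ^ k % 3 : Nat) : Int) := by
      funext k
      simp only [Function.comp, zero_add, Int.toNat_natCast]
      rw [show ((3:Int) ^ k) = ((3 ^ k : Nat) : Int) by push_cast; ring]
      rw [show PySem.Int.floordiv ((n:Nat):Int) ((3^k:Nat):Int) = ((n / 3^k : Nat):Int)
            from PySem.Int.floordiv_natCast n (3^k)]
      exact_mod_cast PySem.Int.mod_natCast (n / 3^k) 3
    rw [hfun, sub_zero, Int.toNat_natCast, pv_core n t le_rfl]
    simp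
    omega
  rw [hB]
  rcases Nat.eq_zero_or_pos n with rfl | hn
  · -- pos == 0 branch of A
    have ht0 : t = 0 := by simp [ht, pvLE_zero]
    rw [ht0]
    simp only [dec2ternary_py, Nat.cast_zero, pvLE_zero,
      List.reverse_nil, List.append_nil, if_pos]
    congr 1
    omega
  · -- pos > 0 branch of A
    have hne : ((n:Int)) ≠ 0 := by exact_mod_cast hn.ne'
    have hA : pvAloop (((n:Int)).toNat + 1) (n:Int) [] = pvLE n := by
      rw [Int.toNat_natCast]
      simpa using pvAloop_eq (n+1) n [] (by omega)
    simp only [dec2ternary_py, if_neg hne, hA, ← ht]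
    congr 2
    omega
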